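-- pv_equiv track=rewrite | github.com/ASK9669/CSEC_CPD | Night at the Museum.py | min_rotations_to_print_name
-- ===== SOURCE A (Python) =====
-- def min_rotations_to_print_name(name):
--     current_position = 0
--     total_rotations = 0
--
--     for char in name:
--         target_position = ord(char) - ord('a')
--
--         # Calculate clockwise and counterclockwise distances
--         clockwise_distance = abs(target_position - current_position)
--         counterclockwise_distance = 26 - clockwise_distance
--
--         # Add the minimum of the two distances to the total
--         total_rotations += min(clockwise_distance, counterclockwise_distance)
--
--         # Update the current position to the target
--         current_position = target_position
--
--     return total_rotations
-- ===== SOURCE B (Python) =====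
-- def min_rotations_to_print_name(name):
--     # Divide and conquer over the wheel positions: split the segment at the
--     # midpoint, carrying the position at the boundary into the right half.
--     # Each unit step uses the branchless identity min(d, 26-d) = 13 - |d-13|.
--     pos = [ord(c) - ord('a') for c in name]
--
--     def solve(prev, lo, hi):
--         if lo == hi:
--             return 0
--         if hi - lo == 1:
--             d = abs(pos[lo] - prev)
--             return 13 - abs(d - 13)
--         mid = (lo + hi) // 2
--         return solve(prev, lo, mid) + solve(pos[mid - 1], mid, hi)
--
--     return solve(0, 0, len(pos))
-- ===== Notes on version B (the rewrite author's own statement) =====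
-- stated objective: alternative
-- what changed: Replaces A's single stateful left-to-right accumulator loop with a divide-and-conquer recursion over the position array (split segment at the midpoint, carry the boundary position into the right half) and replaces the explicit min of clockwise/counterclockwise distances with the branchless identity min(d, 26-d) = 13 - |d - 13|.
import Mathlib
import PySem

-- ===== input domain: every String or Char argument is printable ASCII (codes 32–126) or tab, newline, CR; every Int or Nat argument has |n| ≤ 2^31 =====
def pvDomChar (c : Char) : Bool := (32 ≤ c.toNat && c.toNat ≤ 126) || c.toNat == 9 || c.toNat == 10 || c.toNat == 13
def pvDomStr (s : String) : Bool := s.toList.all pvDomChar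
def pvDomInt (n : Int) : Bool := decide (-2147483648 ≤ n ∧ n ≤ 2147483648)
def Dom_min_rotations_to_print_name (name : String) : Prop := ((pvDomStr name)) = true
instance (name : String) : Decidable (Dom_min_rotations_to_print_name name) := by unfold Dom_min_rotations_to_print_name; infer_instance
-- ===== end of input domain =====

-- B replaces A's fused accumulator loop with a divide-and-conquer segment recursion using min(d,26-d) = 13-|d-13|; equivalence is exact.

-- ===== PORT A =====
-- A: one fused loop carrying (current_position, total_rotations).
def min_rotations_to_print_name (name : String) : Int :=
  (name.toList.foldl
    (fun (st : Int × Int) (c : Char) =>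
      let target : Int := (c.toNat : Int) - 97
      let cw : Int := |target - st.1|
      let ccw : Int := 26 - cw
      (target, st.2 + min cw ccw))
    (0, 0)).2

-- ===== PORT B =====
-- B's helper solve(prev, lo, hi): divide-and-conquer on the segment [lo, hi) of pos.
def pvSolve (pos : List Int) (prev : Int) (lo hi : Nat) : Int :=
  if _h0 : hi ≤ lo then 0
  else if _h1 : hi - lo = 1 then
    let d : Int := |pos.getD lo 0 - prev|
    13 - |d - 13|
  else
    let mid : Nat := (lo + hi) / 2
    pvSolve pos prev lo mid + pvSolve pos (pos.getD (mid - 1) 0) mid hi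
termination_by hi - lo
decreasing_by all_goals omega

def min_rotations_to_print_name_alt (name : String) : Int :=
  let pos : List Int := name.toList.map (fun c => (c.toNat : Int) - 97)
  pvSolve pos 0 0 pos.length

-- ===== PRECONDITION & SPEC =====
def Spec_min_rotations_to_print_name (name : String) (out : Int) : Prop := out = min_rotations_to_print_name_alt name
instance (name : String) (out : Int) : Decidable (Spec_min_rotations_to_print_name name out) := by unfold Spec_min_rotations_to_print_name; infer_instance

-- ===== CLAIM (what is proved, stated in full; the proofs are below) =====
def Claim_equal_min_rotations_to_print_name : Prop := ∀ (name : String), Dom_min_rotations_to_print_name name → Spec_min_rotations_to_print_name name (min_rotations_to_print_name name)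

-- ===== LEMMAS AND PROOFS =====

-- Linear reference: index-by-index sum of steps 13 - ||p i - prev| - 13| over [lo, hi).
def pvLinIdx (pos : List Int) (prev : Int) (lo hi : Nat) : Int :=
  if lo < hi then
    (13 - |(|pos.getD lo 0 - prev|) - 13|) + pvLinIdx pos (pos.getD lo 0) (lo + 1) hi
  else 0
termination_by hi - lo
decreasing_by omega

theorem pvLinIdx_step (pos : List Int) (prev : Int) (lo hi : Nat) (h : lo < hi) :
    pvLinIdx pos prev lo hi
      = (13 - |(|pos.getD lo 0 - prev|) - 13|) + pvLinIdx pos (pos.getD lo 0) (lo + 1) hi := by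
  rw [pvLinIdx, if_pos h]

theorem pvLinIdx_stop (pos : List Int) (prev : Int) (lo hi : Nat) (h : ¬ lo < hi) :
    pvLinIdx pos prev lo hi = 0 := by
  rw [pvLinIdx, if_neg h]

-- Splitting the linear sum at mid, carrying pos[mid-1] into the right part.
theorem pvLinIdx_split (pos : List Int) :
    ∀ (n lo : Nat) (prev : Int) (mid hi : Nat), lo < mid → mid ≤ hi → mid - lo ≤ n →
      pvLinIdx pos prev lo hi
        = pvLinIdx pos prev lo mid + pvLinIdx pos (pos.getD (mid - 1) 0) mid hi := by
  intro n
  induction n with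
  | zero => intro lo prev mid hi h1 h2 h3; omega
  | succ n ih =>
      intro lo prev mid hi h1 h2 h3
      by_cases hm : lo + 1 = mid
      · rw [pvLinIdx_step pos prev lo hi (by omega),
            pvLinIdx_step pos prev lo mid (by omega),
            pvLinIdx_stop pos (pos.getD lo 0) (lo + 1) mid (by omega)]
        have hx : mid - 1 = lo := by omega
        rw [hx, ← hm]; ring
      · rw [pvLinIdx_step pos prev lo hi (by omega),
            pvLinIdx_step pos prev lo mid (by omega),
            ih (lo + 1) (pos.getD lo 0) mid hi (by omega) h2 (by omega)]
        ring

-- The divide-and-conquer recursion computes the linear sum.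
theorem pvSolve_eq_linIdx (pos : List Int) :
    ∀ (n lo hi : Nat) (prev : Int), hi - lo ≤ n →
      pvSolve pos prev lo hi = pvLinIdx pos prev lo hi := by
  intro n
  induction n with
  | zero =>
      intro lo hi prev h
      rw [pvSolve, pvLinIdx]
      simp only [dif_pos (by omega : hi ≤ lo), if_neg (by omega : ¬ lo < hi)]
  | succ n ih =>
      intro lo hi prev h
      rw [pvSolve]
      by_cases h0 : hi ≤ lo
      · rw [dif_pos h0, pvLinIdx_stop pos prev lo hi (by omega)]
      · rw [dif_neg h0]
        by_cases h1 : hi - lo = 1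
        · rw [dif_pos h1, pvLinIdx_step pos prev lo hi (by omega),
              pvLinIdx_stop pos (pos.getD lo 0) (lo + 1) hi (by omega)]
          ring
        · rw [dif_neg h1]
          show pvSolve pos prev lo ((lo + hi) / 2)
                + pvSolve pos (pos.getD ((lo + hi) / 2 - 1) 0) ((lo + hi) / 2) hi
              = pvLinIdx pos prev lo hi
          rw [ih lo ((lo + hi) / 2) prev (by omega),
              ih ((lo + hi) / 2) hi (pos.getD ((lo + hi) / 2 - 1) 0) (by omega),
              ← pvLinIdx_split pos (hi - lo) lo prev ((lo + hi) / 2) hi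
                  (by omega) (by omega) (by omega)]

-- Per-step identity: min(d, 26 - d) = 13 - |d - 13| for any integer d.
theorem pv_step_eq (d : Int) : min d (26 - d) = 13 - |d - 13| := by
  rcases abs_cases (d - 13) with ⟨h1, _⟩ | ⟨h1, _⟩ <;> rw [h1] <;> omega

-- List-structured linear reference, for connecting A's fold to pvLinIdx.
def pvLin : Int → List Int → Int
  | _, [] => 0
  | prev, t :: ts => (13 - |(|t - prev|) - 13|) + pvLin t ts

-- A's fold from state (cur, tot) equals tot plus the list-structured linear sum.
theorem pv_fold_eq_lin (cs : List Char) (cur tot : Int) :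
    (cs.foldl
      (fun (st : Int × Int) (c : Char) =>
        let target : Int := (c.toNat : Int) - 97
        let cw : Int := |target - st.1|
        let ccw : Int := 26 - cw
        (target, st.2 + min cw ccw))
      (cur, tot)).2
    = tot + pvLin cur (cs.map (fun c => (c.toNat : Int) - 97)) := by
  induction cs generalizing cur tot with
  | nil => simp [pvLin]
  | cons c cs ih =>
      simp only [List.foldl_cons, List.map_cons, pvLin]
      rw [ih, pv_step_eq]
      ring

-- The index form over [lo, length) is the list form over the dropped suffix.
theorem pvLinIdx_eq_lin (pos : List Int) :
    ∀ (n lo : Nat) (prev : Int), pos.length - lo ≤ n →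
      pvLinIdx pos prev lo pos.length = pvLin prev (pos.drop lo) := by
  intro n
  induction n with
  | zero =>
      intro lo prev h
      rw [pvLinIdx_stop pos prev lo pos.length (by omega),
          List.drop_of_length_le (by omega), pvLin]
  | succ n ih =>
      intro lo prev h
      by_cases hlt : lo < pos.length
      · rw [pvLinIdx_step pos prev lo pos.length hlt, List.drop_eq_getElem_cons hlt, pvLin,
            ih (lo + 1) (pos.getD lo 0) (by omega)]
        have : pos.getD lo 0 = pos[lo] := List.getD_eq_getElem pos 0 hlt
        rw [this]
      · rw [pvLinIdx_stop pos prev lo pos.length hlt,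
            List.drop_of_length_le (by omega), pvLin]

-- ===== VERDICT (by name: the statement is the Claim_ definition above) =====
theorem min_rotations_to_print_name_spec : Claim_equal_min_rotations_to_print_name := by
  intro name _
  unfold Spec_min_rotations_to_print_name min_rotations_to_print_name min_rotations_to_print_name_alt
  rw [pvSolve_eq_linIdx _ ((name.toList.map (fun c => (c.toNat : Int) - 97)).length) _ _ _ (by omega),
      pvLinIdx_eq_lin _ ((name.toList.map (fun c => (c.toNat : Int) - 97)).length) 0 0 (by omega),
      List.drop_zero, pv_fold_eq_lin]
  ring
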